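-- pv_equiv track=rewrite | github.com/pjm4github/GraphVIZPy | gvpy/engines/layout/dot/straight_edge.py | _find_shortest_cycle_with_edge
-- ===== SOURCE A (Python) =====
-- def _cycle_contains_edge(cycle: list[str], tail: str, head: str) -> bool:
--     """Check if the directed edge tail→head is in the cycle.
--
--     See: /lib/common/routespl.c @ 793
--     """
--     n = len(cycle)
--     for i in range(n):
--         c_start = cycle[i - 1] if i > 0 else cycle[n - 1]
--         c_end = cycle[i]
--         if c_start == tail and c_end == head:
--             return True
--     return False
--
-- def _find_shortest_cycle_with_edge(cycles: list[list[str]],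
--                                    tail: str, head: str,
--                                    min_size: int = 3) -> list[str] | None:
--     """Find the shortest cycle containing the edge tail→head.
--
--     See: /lib/common/routespl.c @ 884
--     """
--     shortest = None
--     for cycle in cycles:
--         if len(cycle) < min_size:
--             continue
--         if shortest is not None and len(shortest) <= len(cycle):
--             continue
--         if _cycle_contains_edge(cycle, tail, head):
--             shortest = cycle
--     return shortest
-- ===== SOURCE B (Python) =====
-- def _cycle_contains_edge(cycle: list[str], tail: str, head: str) -> bool:
--     n = len(cycle)
--     for i in range(n):
--         c_start = cycle[i - 1] if i > 0 else cycle[n - 1]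
--         c_end = cycle[i]
--         if c_start == tail and c_end == head:
--             return True
--     return False
--
-- def _find_shortest_cycle_with_edge(cycles: list[list[str]],
--                                    tail: str, head: str,
--                                    min_size: int = 3) -> list[str] | None:
--     # Stable sort by length, then return the first qualifying cycle: the sort's
--     # stability makes this the first-in-original-order cycle of minimal length,
--     # exactly A's running strict-minimum.
--     for cycle in sorted(cycles, key=len):
--         if len(cycle) >= min_size and _cycle_contains_edge(cycle, tail, head):
--             return cycle
--     return None
-- ===== Notes on version B (the rewrite author's own statement) =====
-- stated objective: alternative
-- what changed: A's single-pass running strict-minimum with skip-continues is replaced by a staged decomposition: stable-sort the cycles by length, then scan the sorted list and return the first qualifying cycle (early exit); stability makes that the first-in-original-order shortest qualifying cycle, exactly A's result.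
import Mathlib
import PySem

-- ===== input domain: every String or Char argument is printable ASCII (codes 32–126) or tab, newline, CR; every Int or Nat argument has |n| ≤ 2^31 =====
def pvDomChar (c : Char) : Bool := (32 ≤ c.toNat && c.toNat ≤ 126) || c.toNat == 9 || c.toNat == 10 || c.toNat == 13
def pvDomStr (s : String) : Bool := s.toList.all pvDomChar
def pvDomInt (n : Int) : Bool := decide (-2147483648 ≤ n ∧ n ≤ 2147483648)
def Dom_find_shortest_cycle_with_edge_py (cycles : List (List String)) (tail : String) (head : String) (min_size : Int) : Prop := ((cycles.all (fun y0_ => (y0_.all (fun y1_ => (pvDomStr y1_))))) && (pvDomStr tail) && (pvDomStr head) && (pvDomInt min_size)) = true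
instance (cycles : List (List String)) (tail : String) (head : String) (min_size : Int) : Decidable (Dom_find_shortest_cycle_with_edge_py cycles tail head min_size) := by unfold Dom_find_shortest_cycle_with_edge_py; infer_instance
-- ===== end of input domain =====

-- B replaces A's single-pass running strict-minimum by a staged "stable-sort by length,
-- then return the first qualifying cycle" with early exit: same result, a different decomposition.


-- ===== PORT A =====
-- helper _cycle_contains_edge (Source B carries the verbatim same helper, so both ports share it);
-- the `.getD ""` defaults are never taken: every index is in range (0 ≤ i-1 < n for i > 0, and n-1 when n > 0)
def cycle_contains_edge (cycle : List String) (tail : String) (head : String) : Bool :=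
  let n : Int := cycle.length
  (PySem.List.pyRange 0 n 1).any (fun i =>
    let c_start := if 0 < i then (PySem.List.pyGet? cycle (i - 1)).getD ""
                   else (PySem.List.pyGet? cycle (n - 1)).getD ""
    let c_end := (PySem.List.pyGet? cycle i).getD ""
    c_start == tail && c_end == head)

def find_shortest_cycle_with_edge_py (cycles : List (List String)) (tail : String) (head : String) (min_size : Int) : Option (List String) :=
  cycles.foldl (fun shortest cycle =>
    if (cycle.length : Int) < min_size then shortest
    else if (match shortest with
             | some s => decide (s.length ≤ cycle.length)
             | none => false) then shortest
    else if cycle_contains_edge cycle tail head then some cycle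
    else shortest) none

-- ===== PORT B =====
-- the early-exit `for … return` over the sorted list, as structural recursion
def firstQualifying (tail : String) (head : String) (min_size : Int) : List (List String) → Option (List String)
  | [] => none
  | c :: rest =>
      if decide (min_size ≤ (c.length : Int)) && cycle_contains_edge c tail head then some c
      else firstQualifying tail head min_size rest

def find_shortest_cycle_with_edge_py_alt (cycles : List (List String)) (tail : String) (head : String) (min_size : Int) : Option (List String) :=
  firstQualifying tail head min_size (PySem.List.sorted cycles (fun c => c.length))

-- ===== PRECONDITION & SPEC =====
def Spec_find_shortest_cycle_with_edge_py (cycles : List (List String)) (tail : String) (head : String) (min_size : Int) (out : Option (List String)) : Prop := out = find_shortest_cycle_with_edge_py_alt cycles tail head min_size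
instance (cycles : List (List String)) (tail : String) (head : String) (min_size : Int) (out : Option (List String)) : Decidable (Spec_find_shortest_cycle_with_edge_py cycles tail head min_size out) := by unfold Spec_find_shortest_cycle_with_edge_py; infer_instance

-- ===== CLAIM =====
def Claim_equal_find_shortest_cycle_with_edge_py : Prop := ∀ (cycles : List (List String)) (tail : String) (head : String) (min_size : Int), Dom_find_shortest_cycle_with_edge_py cycles tail head min_size → Spec_find_shortest_cycle_with_edge_py cycles tail head min_size (find_shortest_cycle_with_edge_py cycles tail head min_size)

-- ===== LEMMAS AND PROOFS =====
-- A's loop body equals the guarded first-strict-min step.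
theorem step_eq (tail head : String) (min_size : Int) :
    (fun (shortest : Option (List String)) (cycle : List String) =>
      if (cycle.length : Int) < min_size then shortest
      else if (match shortest with
               | some s => decide (s.length ≤ cycle.length)
               | none => false) then shortest
      else if cycle_contains_edge cycle tail head then some cycle
      else shortest)
    = (fun (acc : Option (List String)) (c : List String) =>
      if (decide (min_size ≤ (c.length : Int)) && cycle_contains_edge c tail head) then
        (match acc with
         | none => some c
         | some m => if c.length < m.length then some c else some m)
      else acc) := by
  funext acc c
  by_cases h1 : (c.length : Int) < min_size
  · have h1' : ¬ (min_size ≤ (c.length : Int)) := by omega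
    simp [h1, h1']
  · have h1' : min_size ≤ (c.length : Int) := by omega
    by_cases h2 : cycle_contains_edge c tail head
    · rcases acc with _ | m
      · simp [h1, h1', h2]
      · simp only [h1, h1', h2, if_false, decide_true, Bool.and_true, if_pos]
        by_cases h3 : m.length ≤ c.length
        · have h3' : ¬ (c.length < m.length) := by omega
          simp [h3, h3']
        · have h3' : c.length < m.length := by omega
          simp [h3, h3']
    · rcases acc with _ | m <;> simp [h1, h2]

-- B's early-exit loop is List.find?
theorem firstQualifying_eq_find? (tail head : String) (min_size : Int) (l : List (List String)) :
    firstQualifying tail head min_size l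
      = l.find? (fun c => decide (min_size ≤ (c.length : Int)) && cycle_contains_edge c tail head) := by
  induction l with
  | nil => rfl
  | cons c rest ih =>
      simp only [firstQualifying, List.find?_cons, ih]
      cases (decide (min_size ≤ (c.length : Int)) && cycle_contains_edge c tail head) <;> simp

-- inserting into a length-sorted list commutes with taking the first match, up to a strict-min combine
theorem find?_insertBy (q : List String → Bool) (x : List String) :
    ∀ (s : List (List String)), s.Pairwise (fun a b => a.length ≤ b.length) →
    (PySem.List.insertBy (fun a b => decide (a.length < b.length)) x s).find? q
      = if q x then
          (match s.find? q with
           | none => some x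
           | some v => if x.length < v.length then some x else some v)
        else s.find? q := by
  intro s
  induction s with
  | nil =>
      intro _
      cases h : q x <;> simp [PySem.List.insertBy, List.find?, h]
  | cons y t ih =>
      intro hp
      have hpt : t.Pairwise (fun a b => a.length ≤ b.length) := hp.tail
      have hy : ∀ v ∈ t, y.length ≤ v.length := by
        intro v hv; exact List.rel_of_pairwise_cons hp hv
      by_cases hlt : x.length < y.length
      · have hrw : PySem.List.insertBy (fun a b => decide (a.length < b.length)) x (y :: t)
            = x :: y :: t := by simp [PySem.List.insertBy, hlt]
        rw [hrw]
        cases hqx : q x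
        · simp [List.find?_cons, hqx]
        · have hlhs : (x :: y :: t).find? q = some x := by simp [hqx]
          rw [hlhs, if_pos rfl]
          cases hf : (y :: t).find? q with
          | none => rfl
          | some v =>
              have hmem : v ∈ y :: t := List.mem_of_find?_eq_some hf
              have hvlen : y.length ≤ v.length := by
                rcases List.mem_cons.mp hmem with h | h
                · rw [h]
                · exact hy v h
              have hxv : x.length < v.length := by omega
              simp [hxv]
      · have hins : PySem.List.insertBy (fun a b => decide (a.length < b.length)) x (y :: t)
            = y :: PySem.List.insertBy (fun a b => decide (a.length < b.length)) x t := by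
          simp [PySem.List.insertBy, hlt]
        rw [hins]
        cases hqy : q y
        · have h1 : (y :: t).find? q = t.find? q := by simp [hqy]
          have h2 : (y :: PySem.List.insertBy (fun a b => decide (a.length < b.length)) x t).find? q
              = (PySem.List.insertBy (fun a b => decide (a.length < b.length)) x t).find? q := by
            simp [hqy]
          rw [h2, h1, ih hpt]
        · have h1 : (y :: t).find? q = some y := by simp [hqy]
          have h2 : (y :: PySem.List.insertBy (fun a b => decide (a.length < b.length)) x t).find? q
              = some y := by simp [hqy]
          rw [h2, h1]
          cases hqx : q x <;> simp [hlt]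

-- sorted of a snoc is one insertion into the sorted prefix
theorem sorted_snoc (xs : List (List String)) (x : List String) :
    PySem.List.sorted (xs ++ [x]) (fun c => c.length)
      = PySem.List.insertBy (fun a b => decide ((a : List String).length < b.length)) x
          (PySem.List.sorted xs (fun c => c.length)) := by
  rw [PySem.List.sorted_eq_foldl_insertBy, PySem.List.sorted_eq_foldl_insertBy, List.foldl_append]
  rfl

-- the central bridge: first qualifying element of the stable length-sort = running strict minimum
theorem find?_sorted_eq_foldl (q : List String → Bool) (xs : List (List String)) :
    (PySem.List.sorted xs (fun c => c.length)).find? q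
      = xs.foldl (fun acc c =>
          if q c then
            (match acc with
             | none => some c
             | some m => if c.length < m.length then some c else some m)
          else acc) none := by
  induction xs using List.reverseRecOn with
  | nil => rfl
  | append_singleton xs x ih =>
      rw [sorted_snoc, List.foldl_append,
        find?_insertBy q x _ (PySem.List.sorted_pairwise xs (fun c => c.length)), ih]
      cases hqx : q x <;> simp [List.foldl, hqx]

-- ===== VERDICT =====
theorem find_shortest_cycle_with_edge_py_spec : Claim_equal_find_shortest_cycle_with_edge_py := by
  intro cycles tail head min_size _
  show find_shortest_cycle_with_edge_py cycles tail head min_size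
      = find_shortest_cycle_with_edge_py_alt cycles tail head min_size
  unfold find_shortest_cycle_with_edge_py find_shortest_cycle_with_edge_py_alt
  rw [step_eq, firstQualifying_eq_find?, find?_sorted_eq_foldl]
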